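-- pv_equiv track=rewrite | github.com/lolotobg/FakeNewsChallenge | classic/feature_engineering.py | append_ngrams
-- ===== SOURCE A (Python) =====
-- def ngrams(tokens, n):
--     return chargrams(tokens, n)
--
-- def chargrams(input, n):
--     output = []
--     for i in range(len(input) - n + 1):
--         output.append(input[i:i + n])
--     return output
--
-- def append_ngrams(features, headline_tokens, clean_body, _clean_body_100, clean_body_255, size):
--     grams = [' '.join(x) for x in ngrams(headline_tokens, size)]
--     grams_hits = 0
--     grams_early_hits = 0
--     for gram in grams:
--         if gram in clean_body_255:
--             grams_hits += 1
--             grams_early_hits += 1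
--         elif gram in clean_body:
--             grams_hits += 1
--
--     features.append(grams_hits)
--     features.append(grams_early_hits)
--     return features
-- ===== SOURCE B (Python) =====
-- def append_ngrams(features, headline_tokens, clean_body, _clean_body_100, clean_body_255, size):
--     # Count each distinct gram's multiplicity once, then do the substring
--     # tests once per distinct gram instead of once per occurrence.
--     counts = {}
--     for i in range(len(headline_tokens) - size + 1):
--         gram = ' '.join(headline_tokens[i:i + size])
--         counts[gram] = counts.get(gram, 0) + 1
--     grams_hits = 0
--     grams_early_hits = 0
--     for gram, c in counts.items():
--         if gram in clean_body_255:
--             grams_hits += c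
--             grams_early_hits += c
--         elif gram in clean_body:
--             grams_hits += c
--     features.append(grams_hits)
--     features.append(grams_early_hits)
--     return features
-- ===== Notes on version B (the rewrite author's own statement) =====
-- stated objective: alternative
-- what changed: B builds a dict counting each distinct gram's multiplicity in one pass and then performs the two substring tests once per DISTINCT gram (weighting by multiplicity), instead of A's building the full gram list and testing every occurrence separately.
import Mathlib
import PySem

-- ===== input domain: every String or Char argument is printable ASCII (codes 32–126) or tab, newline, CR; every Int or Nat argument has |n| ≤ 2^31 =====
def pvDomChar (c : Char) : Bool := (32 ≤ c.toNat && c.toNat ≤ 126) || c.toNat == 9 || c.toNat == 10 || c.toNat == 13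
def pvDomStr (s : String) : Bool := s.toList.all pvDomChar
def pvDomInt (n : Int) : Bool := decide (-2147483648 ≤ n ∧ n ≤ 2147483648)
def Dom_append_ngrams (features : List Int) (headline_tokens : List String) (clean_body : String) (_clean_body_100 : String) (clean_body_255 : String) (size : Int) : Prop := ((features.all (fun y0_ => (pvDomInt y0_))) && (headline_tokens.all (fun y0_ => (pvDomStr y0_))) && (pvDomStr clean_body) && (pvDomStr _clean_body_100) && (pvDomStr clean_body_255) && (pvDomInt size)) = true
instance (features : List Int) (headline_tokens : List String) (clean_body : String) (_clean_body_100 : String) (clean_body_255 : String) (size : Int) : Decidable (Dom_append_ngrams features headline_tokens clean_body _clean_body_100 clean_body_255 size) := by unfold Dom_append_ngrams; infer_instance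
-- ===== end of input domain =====

-- B replaces A's per-occurrence substring tests over the gram list by one counter over the
-- grams and one substring test per DISTINCT gram (counted with multiplicity); return values
-- agree everywhere (A also mutates `features` in place; B performs the same append, the
-- theorems below are about the return value).

-- ===== PORT A =====
def chargrams (input : List String) (n : Int) : List (List String) :=
  (PySem.List.pyRange 0 ((input.length : Int) - n + 1) 1).foldl
    (fun output i => output ++ [PySem.List.slice input (some i) (some (i + n))]) []

def ngrams (tokens : List String) (n : Int) : List (List String) := chargrams tokens n

def append_ngrams (features : List Int) (headline_tokens : List String) (clean_body : String) (_clean_body_100 : String) (clean_body_255 : String) (size : Int) : List Int :=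
  let grams := (ngrams headline_tokens size).map (fun x => PySem.Str.join " " x)
  let p := grams.foldl (fun (s : Int × Int) gram =>
      if PySem.Str.isIn gram clean_body_255 then (s.1 + 1, s.2 + 1)
      else if PySem.Str.isIn gram clean_body then (s.1 + 1, s.2)
      else s) (0, 0)
  features ++ [p.1, p.2]

-- ===== PORT B =====
def append_ngrams_alt (features : List Int) (headline_tokens : List String) (clean_body : String) (_clean_body_100 : String) (clean_body_255 : String) (size : Int) : List Int :=
  let counts : PySem.Dict String Int :=
    (PySem.List.pyRange 0 ((headline_tokens.length : Int) - size + 1) 1).foldl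
      (fun d i =>
        d.modify (PySem.Str.join " " (PySem.List.slice headline_tokens (some i) (some (i + size)))) 0 (· + 1))
      PySem.Dict.empty
  let p := counts.items.foldl (fun (s : Int × Int) gc =>
      if PySem.Str.isIn gc.1 clean_body_255 then (s.1 + gc.2, s.2 + gc.2)
      else if PySem.Str.isIn gc.1 clean_body then (s.1 + gc.2, s.2)
      else s) (0, 0)
  features ++ [p.1, p.2]

-- ===== PRECONDITION & SPEC =====
def Spec_append_ngrams (features : List Int) (headline_tokens : List String) (clean_body : String) (_clean_body_100 : String) (clean_body_255 : String) (size : Int) (out : List Int) : Prop := out = append_ngrams_alt features headline_tokens clean_body _clean_body_100 clean_body_255 size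
instance (features : List Int) (headline_tokens : List String) (clean_body : String) (_clean_body_100 : String) (clean_body_255 : String) (size : Int) (out : List Int) : Decidable (Spec_append_ngrams features headline_tokens clean_body _clean_body_100 clean_body_255 size out) := by unfold Spec_append_ngrams; infer_instance

-- ===== CLAIM (what is proved, stated in full; the proofs are below) =====
def Claim_equal_append_ngrams : Prop := ∀ (features : List Int) (headline_tokens : List String) (clean_body : String) (_clean_body_100 : String) (clean_body_255 : String) (size : Int), Dom_append_ngrams features headline_tokens clean_body _clean_body_100 clean_body_255 size → Spec_append_ngrams features headline_tokens clean_body _clean_body_100 clean_body_255 size (append_ngrams features headline_tokens clean_body _clean_body_100 clean_body_255 size)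

-- ===== LEMMAS AND PROOFS =====

-- the per-gram contributions to (grams_hits, grams_early_hits)
def hit1 (body b255 gram : String) : Int :=
  if PySem.Str.isIn gram b255 then 1 else if PySem.Str.isIn gram body then 1 else 0
def hit2 (b255 gram : String) : Int :=
  if PySem.Str.isIn gram b255 then 1 else 0

-- A's loop is the pair of sums of per-gram contributions
theorem foldA_eq (body b255 : String) (l : List String) (h e : Int) :
    l.foldl (fun (s : Int × Int) gram =>
      if PySem.Str.isIn gram b255 then (s.1 + 1, s.2 + 1)
      else if PySem.Str.isIn gram body then (s.1 + 1, s.2)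
      else s) (h, e)
    = (h + (l.map (hit1 body b255)).sum, e + (l.map (hit2 b255)).sum) := by
  induction l generalizing h e with
  | nil => simp
  | cons x xs ih =>
    simp only [List.foldl_cons, List.map_cons, List.sum_cons]
    by_cases h1 : PySem.Str.isIn x b255 = true
    · rw [if_pos h1, ih, show hit1 body b255 x = 1 by unfold hit1; rw [if_pos h1],
          show hit2 b255 x = 1 by unfold hit2; rw [if_pos h1]]
      simp only [Prod.mk.injEq]; exact ⟨by ring, by ring⟩
    · by_cases h2 : PySem.Str.isIn x body = true
      · rw [if_neg h1, if_pos h2, ih,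
            show hit1 body b255 x = 1 by unfold hit1; rw [if_neg h1, if_pos h2],
            show hit2 b255 x = 0 by unfold hit2; rw [if_neg h1]]
        simp only [Prod.mk.injEq]; exact ⟨by ring, by ring⟩
      · rw [if_neg h1, if_neg h2, ih,
            show hit1 body b255 x = 0 by unfold hit1; rw [if_neg h1, if_neg h2],
            show hit2 b255 x = 0 by unfold hit2; rw [if_neg h1]]
        simp only [Prod.mk.injEq]; exact ⟨by ring, by ring⟩

-- B's loop is the pair of sums of multiplicity-weighted contributions
theorem foldB_eq (body b255 : String) (ps : List (String × Int)) (h e : Int) :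
    ps.foldl (fun (s : Int × Int) gc =>
      if PySem.Str.isIn gc.1 b255 then (s.1 + gc.2, s.2 + gc.2)
      else if PySem.Str.isIn gc.1 body then (s.1 + gc.2, s.2)
      else s) (h, e)
    = (h + (ps.map (fun p => p.2 * hit1 body b255 p.1)).sum,
       e + (ps.map (fun p => p.2 * hit2 b255 p.1)).sum) := by
  induction ps generalizing h e with
  | nil => simp
  | cons x xs ih =>
    simp only [List.foldl_cons, List.map_cons, List.sum_cons]
    by_cases h1 : PySem.Str.isIn x.1 b255 = true
    · rw [if_pos h1, ih, show hit1 body b255 x.1 = 1 by unfold hit1; rw [if_pos h1],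
          show hit2 b255 x.1 = 1 by unfold hit2; rw [if_pos h1]]
      simp only [Prod.mk.injEq]; exact ⟨by ring, by ring⟩
    · by_cases h2 : PySem.Str.isIn x.1 body = true
      · rw [if_neg h1, if_pos h2, ih,
            show hit1 body b255 x.1 = 1 by unfold hit1; rw [if_neg h1, if_pos h2],
            show hit2 b255 x.1 = 0 by unfold hit2; rw [if_neg h1]]
        simp only [Prod.mk.injEq]; exact ⟨by ring, by ring⟩
      · rw [if_neg h1, if_neg h2, ih,
            show hit1 body b255 x.1 = 0 by unfold hit1; rw [if_neg h1, if_neg h2],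
            show hit2 b255 x.1 = 0 by unfold hit2; rw [if_neg h1]]
        simp only [Prod.mk.injEq]; exact ⟨by ring, by ring⟩

-- summing 'if g = x then c else 0' over a nodup list containing x gives c
theorem sum_single (d : List String) (x : String) (c : Int) (hnd : d.Nodup) (hx : x ∈ d) :
    (d.map (fun g => if g = x then c else 0)).sum = c := by
  induction d with
  | nil => cases hx
  | cons y ys ih =>
    simp only [List.map_cons, List.sum_cons]
    rcases List.mem_cons.mp hx with rfl | hmem
    · rw [if_pos rfl]
      have : (ys.map (fun g => if g = x then c else 0)).sum = 0 := by
        apply List.sum_eq_zero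
        intro z hz
        rcases List.mem_map.mp hz with ⟨g, hg, rfl⟩
        have : g ≠ x := fun h => (List.nodup_cons.mp hnd).1 (h ▸ hg)
        simp [this]
      simp [this]
    · have hy : y ≠ x := fun h => (List.nodup_cons.mp hnd).1 (h ▸ hmem)
      rw [if_neg hy, ih (List.nodup_cons.mp hnd).2 hmem]
      ring

-- summing count-weighted contributions over any nodup superset of l's elements = plain sum over l
theorem sum_count_mul (l d : List String) (f : String → Int)
    (hnd : d.Nodup) (hsub : ∀ x ∈ l, x ∈ d) :
    (d.map (fun g => (l.count g : Int) * f g)).sum = (l.map f).sum := by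
  induction l with
  | nil => simp
  | cons x xs ih =>
    have hx : x ∈ d := hsub x (List.mem_cons_self ..)
    have hsub' : ∀ y ∈ xs, y ∈ d := fun y hy => hsub y (List.mem_cons_of_mem _ hy)
    have hsplit : (d.map (fun g => ((x :: xs).count g : Int) * f g)).sum
        = (d.map (fun g => (xs.count g : Int) * f g)).sum
          + (d.map (fun g => if g = x then f g else 0)).sum := by
      rw [← PySem.List.sum_map_add_int]
      apply congrArg List.sum
      apply List.map_congr_left
      intro g _
      by_cases hgx : g = x
      · subst hgx; simp [List.count_cons_self]; ring
      · have hxg : x ≠ g := fun h => hgx h.symm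
        simp [hgx, hxg]
    have hone : (d.map (fun g => if g = x then f g else 0)).sum = f x := by
      have : (d.map (fun g => if g = x then f g else 0))
           = (d.map (fun g => if g = x then f x else 0)) := by
        apply List.map_congr_left; intro g _; by_cases hgx : g = x <;> simp [hgx]
      rw [this, sum_single d x (f x) hnd hx]
    rw [List.map_cons, List.sum_cons, hsplit, ih hsub', hone]
    ring

theorem append_ngrams_spec_aux (features : List Int) (headline_tokens : List String)
    (clean_body _clean_body_100 clean_body_255 : String) (size : Int) :
    append_ngrams features headline_tokens clean_body _clean_body_100 clean_body_255 size
    = append_ngrams_alt features headline_tokens clean_body _clean_body_100 clean_body_255 size := by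
  simp only [append_ngrams, append_ngrams_alt, ngrams, chargrams]
  rw [PySem.List.foldl_append_singleton_eq_map, List.nil_append, List.map_map]
  set R := PySem.List.pyRange 0 ((headline_tokens.length : Int) - size + 1) 1 with hR
  have hgrams : ((fun x => PySem.Str.join " " x) ∘
      fun i => PySem.List.slice headline_tokens (some i) (some (i + size)))
      = fun i => PySem.Str.join " " (PySem.List.slice headline_tokens (some i) (some (i + size))) := rfl
  rw [hgrams]
  -- B's dict is the counter of the same gram list
  have hcounts : R.foldl (fun d i =>
        d.modify (PySem.Str.join " " (PySem.List.slice headline_tokens (some i) (some (i + size)))) 0 (· + 1))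
        PySem.Dict.empty
      = PySem.Dict.counter (R.map (fun i =>
          PySem.Str.join " " (PySem.List.slice headline_tokens (some i) (some (i + size))))) := by
    rw [PySem.Dict.counter_eq_foldl, List.foldl_map]
  rw [hcounts, PySem.Dict.items_counter]
  set G := R.map (fun i =>
      PySem.Str.join " " (PySem.List.slice headline_tokens (some i) (some (i + size)))) with hG
  rw [foldA_eq, foldB_eq]
  simp only [List.map_map]
  have h1 : ((PySem.Set.ofList G).map
        ((fun p => p.2 * hit1 clean_body clean_body_255 p.1) ∘ fun k => (k, (G.count k : Int)))).sum
      = (G.map (hit1 clean_body clean_body_255)).sum := by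
    apply sum_count_mul G (PySem.Set.ofList G) _ (PySem.Set.nodup_ofList G)
    intro x hx; exact (PySem.Set.mem_ofList G x).mpr hx
  have h2 : ((PySem.Set.ofList G).map
        ((fun p => p.2 * hit2 clean_body_255 p.1) ∘ fun k => (k, (G.count k : Int)))).sum
      = (G.map (hit2 clean_body_255)).sum := by
    apply sum_count_mul G (PySem.Set.ofList G) _ (PySem.Set.nodup_ofList G)
    intro x hx; exact (PySem.Set.mem_ofList G x).mpr hx
  rw [h1, h2]

-- ===== VERDICT (by name: the statement is the Claim_ definition above) =====
theorem append_ngrams_spec : Claim_equal_append_ngrams := by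
  intro features headline_tokens clean_body _clean_body_100 clean_body_255 size _
  exact append_ngrams_spec_aux features headline_tokens clean_body _clean_body_100 clean_body_255 size
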